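-- pv_equiv track=rewrite | github.com/aliviofeyrizkia/Automatisasi-Anemos | tesgithub.py | ambil_data_panel
-- ===== SOURCE A (Python) =====
-- def ambil_data_panel(text):
--
--     lines = text.split("\n")
--
--     temperature=""
--     humidity=""
--     rain=""
--     wind=""
--
--     for i,line in enumerate(lines):
--
--         if line.strip()=="Temperature":
--             temperature = lines[i+1]
--
--         if line.strip()=="Humidity":
--             humidity = lines[i+1]
--
--         if line.strip()=="Precipitation":
--             rain = lines[i+1]
--
--         if line.strip()=="Wind":
--             wind = lines[i+1]
--
--     return temperature,humidity,rain,wind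
-- ===== SOURCE B (Python) =====
-- def ambil_data_panel(text):
--     lines = text.split("\n")
--
--     def after(label):
--         value = ""
--         for i, line in enumerate(lines):
--             if line.strip() == label:
--                 value = lines[i + 1]
--         return value
--
--     return after("Temperature"), after("Humidity"), after("Precipitation"), after("Wind")
-- ===== Notes on version B (the rewrite author's own statement) =====
-- stated objective: simpler
-- what changed: Replaces the single combined pass maintaining four accumulators with a small helper after(label) called once per label (four independent scans), a differently-shaped decomposition.
import Mathlib
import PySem

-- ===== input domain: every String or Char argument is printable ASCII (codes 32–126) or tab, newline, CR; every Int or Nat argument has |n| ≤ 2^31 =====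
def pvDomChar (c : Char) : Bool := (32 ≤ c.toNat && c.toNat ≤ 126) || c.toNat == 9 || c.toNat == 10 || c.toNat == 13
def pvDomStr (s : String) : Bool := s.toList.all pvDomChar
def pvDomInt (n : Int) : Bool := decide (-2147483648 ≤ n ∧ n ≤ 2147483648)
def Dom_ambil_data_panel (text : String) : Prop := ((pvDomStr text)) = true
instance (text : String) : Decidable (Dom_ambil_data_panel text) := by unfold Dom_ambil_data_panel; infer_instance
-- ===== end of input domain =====

-- B replaces A's single pass carrying four accumulators by a helper scanned once per label (objective: simpler decomposition).

-- ===== PORT A =====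
-- text.split("\n") with a nonempty separator always succeeds: split? returns some, .getD [] is exact.
-- One combined pass over enumerate(lines) updating the four accumulators.
-- lines[i+1] is ported with pyGetD (default ""): Pre_ guarantees the index is in range,
-- exactly where Python raises IndexError is excluded by Pre_.
def ambil_data_panel (text : String) : String × String × String × String :=
  let lines := (PySem.Str.split? text "\n").getD []
  (PySem.List.enumerate lines 0).foldl
    (fun acc p =>
      let t := if PySem.Str.strip p.2 == "Temperature" then PySem.List.pyGetD lines (p.1 + 1) "" else acc.1
      let h := if PySem.Str.strip p.2 == "Humidity" then PySem.List.pyGetD lines (p.1 + 1) "" else acc.2.1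
      let r := if PySem.Str.strip p.2 == "Precipitation" then PySem.List.pyGetD lines (p.1 + 1) "" else acc.2.2.1
      let w := if PySem.Str.strip p.2 == "Wind" then PySem.List.pyGetD lines (p.1 + 1) "" else acc.2.2.2
      (t, h, r, w))
    ("", "", "", "")

-- ===== PORT B =====
-- helper after(label): one scan returning the line following the last occurrence of label
def pvAfter (lines : List String) (label : String) : String :=
  (PySem.List.enumerate lines 0).foldl
    (fun value p =>
      if PySem.Str.strip p.2 == label then PySem.List.pyGetD lines (p.1 + 1) "" else value)
    ""

def ambil_data_panel_alt (text : String) : String × String × String × String :=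
  let lines := (PySem.Str.split? text "\n").getD []
  (pvAfter lines "Temperature", pvAfter lines "Humidity", pvAfter lines "Precipitation", pvAfter lines "Wind")

-- ===== PRECONDITION & SPEC =====
-- Pre_ excludes exactly the inputs on which A raises IndexError: texts whose LAST line
-- strips to one of the four labels (then lines[i+1] is out of range).
def Pre_ambil_data_panel (text : String) : Prop :=
  PySem.Str.strip (((PySem.Str.split? text "\n").getD []).getLastD "") ∉
    (["Temperature", "Humidity", "Precipitation", "Wind"] : List String)
instance (text : String) : Decidable (Pre_ambil_data_panel text) := by
  unfold Pre_ambil_data_panel; infer_instance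

def pvWitness_ambil_data_panel : String := "Temperature\n20\nWind\n5 kmh\nend"

def Spec_ambil_data_panel (text : String) (out : String × String × String × String) : Prop := out = ambil_data_panel_alt text
instance (text : String) (out : String × String × String × String) : Decidable (Spec_ambil_data_panel text out) := by unfold Spec_ambil_data_panel; infer_instance

-- ===== CLAIM (what is proved, stated in full; the proofs are below) =====
def Claim_equal_ambil_data_panel : Prop := ∀ (text : String), Dom_ambil_data_panel text → Pre_ambil_data_panel text → Spec_ambil_data_panel text (ambil_data_panel text)

-- ===== LEMMAS AND PROOFS =====

-- A's combined fold equals the four independent folds, componentwise, for any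
-- fold list L and any starting accumulator (induction on L generalizing the accumulator).
theorem pv_fold_split (lines : List String) (L : List (Int × String))
    (acc : String × String × String × String) :
    L.foldl
      (fun acc p =>
        let t := if PySem.Str.strip p.2 == "Temperature" then PySem.List.pyGetD lines (p.1 + 1) "" else acc.1
        let h := if PySem.Str.strip p.2 == "Humidity" then PySem.List.pyGetD lines (p.1 + 1) "" else acc.2.1
        let r := if PySem.Str.strip p.2 == "Precipitation" then PySem.List.pyGetD lines (p.1 + 1) "" else acc.2.2.1
        let w := if PySem.Str.strip p.2 == "Wind" then PySem.List.pyGetD lines (p.1 + 1) "" else acc.2.2.2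
        (t, h, r, w)) acc
    = (L.foldl (fun v p => if PySem.Str.strip p.2 == "Temperature" then PySem.List.pyGetD lines (p.1 + 1) "" else v) acc.1,
       L.foldl (fun v p => if PySem.Str.strip p.2 == "Humidity" then PySem.List.pyGetD lines (p.1 + 1) "" else v) acc.2.1,
       L.foldl (fun v p => if PySem.Str.strip p.2 == "Precipitation" then PySem.List.pyGetD lines (p.1 + 1) "" else v) acc.2.2.1,
       L.foldl (fun v p => if PySem.Str.strip p.2 == "Wind" then PySem.List.pyGetD lines (p.1 + 1) "" else v) acc.2.2.2) := by
  induction L generalizing acc with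
  | nil => rfl
  | cons p L ih => simp only [List.foldl_cons]; exact ih _

-- ===== VERDICT (by name: the statement is the Claim_ definition above) =====
theorem ambil_data_panel_spec : Claim_equal_ambil_data_panel := by
  intro text _ _
  unfold Spec_ambil_data_panel ambil_data_panel ambil_data_panel_alt pvAfter
  exact pv_fold_split _ _ _
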